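-- pv_equiv track=rewrite | github.com/tony-the-coder/python_course | section_10/loops.py | department_count
-- ===== SOURCE A (Python) =====
-- def department_count(entries):
--     """Another not so clear question. I should have assumed what it wanted from the tests that did not pass. In this case, I should have checked to make sure that the count was was in entries. I actually has to use GitHub Copilot to help. I have to get better since I am sure I cannot use AI to help me catch such a simple mistake as missing that if statement."""
--
--     department_codes = ["HRD", "ENG", "MKT", "FIN", "IT"]
--     department_counts = {count: 0 for count in department_codes if count in entries}
--     invalid_count = 0
--
--     for entry in entries:
--         if entry in department_codes:
--             department_counts[entry] += 1
--
--         elif entry not in department_codes and entry != "TEST":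
--             invalid_count += 1
--
--     # count entries per department
--     # return department_counts dictionary
--     # return invalid_count, excluding "TEST" values
--
--     return department_counts, invalid_count
-- ===== SOURCE B (Python) =====
-- def department_count(entries):
--     department_codes = ["HRD", "ENG", "MKT", "FIN", "IT"]
--     department_counts = {code: entries.count(code) for code in department_codes if code in entries}
--     invalid_count = sum(1 for e in entries if e not in department_codes and e != "TEST")
--     return department_counts, invalid_count
-- ===== Notes on version B (the rewrite author's own statement) =====
-- stated objective: idiomatic
-- what changed: A maintains a mutable dict and an invalid counter in one pass with branching; B is index-first: a dict comprehension with per-code equality counts (entries.count) plus a separate generator-sum filter for invalid entries.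
import Mathlib
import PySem

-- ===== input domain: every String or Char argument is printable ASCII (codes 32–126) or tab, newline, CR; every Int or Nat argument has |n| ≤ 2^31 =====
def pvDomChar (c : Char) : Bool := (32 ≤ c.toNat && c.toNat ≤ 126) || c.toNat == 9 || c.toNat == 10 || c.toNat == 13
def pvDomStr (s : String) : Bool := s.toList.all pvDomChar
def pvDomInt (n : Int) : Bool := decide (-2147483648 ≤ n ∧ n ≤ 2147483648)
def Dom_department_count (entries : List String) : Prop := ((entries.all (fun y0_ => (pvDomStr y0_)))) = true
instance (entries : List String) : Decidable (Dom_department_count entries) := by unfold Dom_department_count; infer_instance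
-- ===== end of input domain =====

-- B replaces A's single maintained-as-you-go pass (a mutable dict plus a counter) by an
-- index-first decomposition: per-code equality counts and a separate filter for invalids (objective: simpler/idiomatic).

-- ===== PORT A =====
-- literal transliteration of A: dict comprehension seeding 0s, then one pass maintaining (dict, invalid_count)
def department_count (entries : List String) : (List (String × Int)) × Int :=
  let department_codes : List String := ["HRD", "ENG", "MKT", "FIN", "IT"]
  let department_counts : PySem.Dict String Int :=
    (department_codes.filter (fun c => entries.contains c)).foldl
      (fun d c => d.insert c 0) PySem.Dict.empty
  let res := entries.foldl
    (fun (s : PySem.Dict String Int × Int) entry =>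
      if department_codes.contains entry then (s.1.modify entry 0 (· + 1), s.2)
      else if !department_codes.contains entry && entry != "TEST" then (s.1, s.2 + 1)
      else s)
    (department_counts, 0)
  (res.1.items, res.2)

-- ===== PORT B =====
-- literal transliteration of B: {code: entries.count(code) for code in codes if code in entries},
-- invalid = sum(1 for e in entries if e not in codes and e != "TEST")
def department_count_alt (entries : List String) : (List (String × Int)) × Int :=
  let department_codes : List String := ["HRD", "ENG", "MKT", "FIN", "IT"]
  ((department_codes.filter (fun code => entries.contains code)).map
      (fun code => (code, (PySem.List.count entries code : Int))),
   ((entries.filter (fun e => !department_codes.contains e && e != "TEST")).length : Int))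

-- ===== PRECONDITION & SPEC =====
def Spec_department_count (entries : List String) (out : (List (String × Int)) × Int) : Prop := out = department_count_alt entries
instance (entries : List String) (out : (List (String × Int)) × Int) : Decidable (Spec_department_count entries out) := by unfold Spec_department_count; infer_instance

-- ===== CLAIM (what is proved, stated in full; the proofs are below) =====
def Claim_equal_department_count : Prop := ∀ (entries : List String), Dom_department_count entries → Spec_department_count entries (department_count entries)

-- ===== LEMMAS AND PROOFS =====

-- the invalid-count loop is the length of the filtered list
lemma foldl_if_add_one (p : String → Bool) (l : List String) (n : Int) :
    l.foldl (fun m e => if p e then m + 1 else m) n = n + ((l.filter p).length : Int) := by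
  induction l generalizing n with
  | nil => simp
  | cons x xs ih =>
    by_cases h : p x = true <;> simp [List.foldl_cons, h, ih] <;> omega

-- ===== VERDICT (by name: the statement is the Claim_ definition above) =====
theorem department_count_spec : Claim_equal_department_count := by
  intro entries _
  unfold Spec_department_count department_count department_count_alt
  dsimp only
  set codes : List String := ["HRD", "ENG", "MKT", "FIN", "IT"] with hcodes
  set K : List String := codes.filter (fun c => entries.contains c) with hK
  -- the seeded dict
  have hfresh : ∀ a ∈ K, (PySem.Dict.empty : PySem.Dict String Int).contains a = false := by
    intro a _; simp [PySem.Dict.contains_empty]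
  have hKnodup : K.Nodup := by
    apply List.Nodup.filter
    rw [hcodes]; decide
  have h0items :
      (K.foldl (fun d c => d.insert c 0) (PySem.Dict.empty : PySem.Dict String Int)).items
        = K.map (fun c => (c, (0 : Int))) := by
    have := PySem.Dict.items_foldl_insert_fresh K (fun c => c) (fun _ => (0 : Int))
      PySem.Dict.empty hfresh (by simpa using hKnodup)
    simpa using this
  set d0 : PySem.Dict String Int :=
    K.foldl (fun d c => d.insert c 0) PySem.Dict.empty with hd0
  have h0keys : d0.keys = K := by
    simp only [PySem.Dict.keys, h0items, List.map_map]
    exact (List.map_congr_left fun a _ => rfl).trans (List.map_id K)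
  -- split the pair loop into two independent loops
  have hstep :
      (fun (s : PySem.Dict String Int × Int) (entry : String) =>
        if codes.contains entry then (s.1.modify entry 0 (· + 1), s.2)
        else if !codes.contains entry && entry != "TEST" then (s.1, s.2 + 1)
        else s)
      = (fun (s : PySem.Dict String Int × Int) (entry : String) =>
          ((if codes.contains entry then s.1.modify entry 0 (· + 1) else s.1),
           (if !codes.contains entry && entry != "TEST" then s.2 + 1 else s.2))) := by
    funext s e
    by_cases hm : e ∈ codes <;> by_cases he : e = "TEST" <;> simp [hm, he] <;> simp [hcodes]
  rw [hstep,
    PySem.List.foldl_prod_mk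
      (f := fun (d : PySem.Dict String Int) e => if codes.contains e then d.modify e 0 (· + 1) else d)
      (g := fun (n : Int) e => if !codes.contains e && e != "TEST" then n + 1 else n)]
  -- the dict loop only acts on entries that are department codes
  rw [show (fun (d : PySem.Dict String Int) e => if codes.contains e then d.modify e 0 (· + 1) else d)
        = (fun d e => if codes.contains e = true then (fun (d : PySem.Dict String Int) e => d.modify e 0 (· + 1)) d e else d) from rfl,
      ← List.foldl_filter]
  set l : List String := entries.filter
    (fun e => codes.contains e) with hl
  have hlK : ∀ y ∈ l, y ∈ K := by
    intro y hy
    rw [hl] at hy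
    rcases List.mem_filter.1 hy with ⟨hmem, hc⟩
    rw [hK]
    exact List.mem_filter.2 ⟨by simpa using hc, by simpa using hmem⟩
  set d1 : PySem.Dict String Int :=
    l.foldl (fun d e => d.modify e 0 (· + 1)) d0 with hd1
  have hkeys1 : d1.keys = K := by
    rw [hd1, PySem.Dict.keys_foldl_modify l (0 : Int) (fun _ _ v => v + 1) d0, h0keys,
      PySem.Set.update_eq_append_filter]
    have hnil : List.filter (fun y => !PySem.Set.contains K y) (PySem.Set.ofList l) = [] := by
      apply List.filter_eq_nil_iff.2
      intro y hy
      have hyK : y ∈ K := hlK y ((PySem.Set.mem_ofList l y).1 hy)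
      simpa using hyK
    rw [hnil]
    simp
  have hnodup1 : d1.keys.Nodup := by rw [hkeys1]; exact hKnodup
  have hgetD : ∀ k ∈ K, d1.getD k 0 = (entries.count k : Int) := by
    intro k hk
    rw [hd1, PySem.Dict.getD_foldl_modify_add_one]
    have h0 : d0.getD k 0 = 0 := by
      apply PySem.Dict.getD_of_mem_items d0 (k := k) (v := 0)
      · rw [h0items]; exact List.mem_map.2 ⟨k, hk, rfl⟩
      · rw [h0keys]; exact hKnodup
    have hcount : l.count k = entries.count k := by
      rw [hl]
      exact List.count_filter (by simpa using (List.mem_filter.1 (hK ▸ hk)).1)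
    rw [h0, hcount, zero_add]
  have hitems : d1.items = K.map (fun code => (code, (PySem.List.count entries code : Int))) := by
    rw [PySem.Dict.items_eq_map_keys d1 hnodup1 0, hkeys1]
    apply List.map_congr_left
    intro k hk
    rw [hgetD k hk, PySem.List.count_eq]
  -- assemble both components
  refine Prod.ext ?_ ?_
  · simpa using hitems
  · simpa using foldl_if_add_one (fun e => !codes.contains e && e != "TEST") entries 0
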